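-- pv_equiv track=rewrite | github.com/ioannist/six-birds-pica | paper/scripts/plot_common.py | rungs_for_n
-- ===== SOURCE A (Python) =====
-- KMAX_CAP = 64
--
-- def _as_int(value) -> int | None:
--     if value is None:
--         return None
--     try:
--         out = int(value)
--     except (TypeError, ValueError):
--         try:
--             out = int(float(value))
--         except (TypeError, ValueError):
--             return None
--     return out
--
-- def rungs_for_n(n: int, kmax_cap: int = KMAX_CAP) -> list[int]:
--     n_i = _as_int(n)
--     if n_i is None or n_i < 2:
--         return []
--     kmax = min(kmax_cap, n_i // 2)
--     out: list[int] = []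
--     k = 2
--     while k <= kmax:
--         out.append(k)
--         k *= 2
--     return out
-- ===== SOURCE B (Python) =====
-- KMAX_CAP = 64
--
-- def _as_int(value):
--     if value is None:
--         return None
--     try:
--         out = int(value)
--     except (TypeError, ValueError):
--         try:
--             out = int(float(value))
--         except (TypeError, ValueError):
--             return None
--     return out
--
-- def rungs_for_n(n: int, kmax_cap: int = KMAX_CAP) -> list:
--     n_i = _as_int(n)
--     if n_i is None or n_i < 2:
--         return []
--     kmax = min(kmax_cap, n_i // 2)
--     return [1 << i for i in range(1, max(kmax, 0).bit_length())]
-- ===== Notes on version B (the rewrite author's own statement) =====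
-- stated objective: idiomatic
-- what changed: Replaces the doubling while-loop with a closed-form count: the number of rungs is max(kmax,0).bit_length()-1, and the list is produced as [1 << i for i in range(1, bit_length)].
import Mathlib
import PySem

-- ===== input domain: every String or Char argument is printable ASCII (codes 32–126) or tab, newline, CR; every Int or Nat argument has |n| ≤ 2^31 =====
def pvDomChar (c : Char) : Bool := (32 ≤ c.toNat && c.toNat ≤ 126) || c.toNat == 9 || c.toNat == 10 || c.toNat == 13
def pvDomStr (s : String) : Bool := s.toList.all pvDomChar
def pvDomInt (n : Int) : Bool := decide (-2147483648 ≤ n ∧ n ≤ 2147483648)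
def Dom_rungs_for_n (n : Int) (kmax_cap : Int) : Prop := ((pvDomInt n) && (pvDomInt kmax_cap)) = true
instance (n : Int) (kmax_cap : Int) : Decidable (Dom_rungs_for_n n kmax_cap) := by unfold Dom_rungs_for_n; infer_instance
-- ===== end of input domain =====

-- B replaces A's doubling while-loop by a closed-form bit-length count (alternative algorithm, same cost at these sizes).


-- ===== PORT A =====
-- the while-loop `while k <= kmax: out.append(k); k *= 2`; k starts at 2 and doubles, so 2 ≤ k is an invariant carried for termination
def rungsLoopA (kmax k : Int) (hk : 2 ≤ k) : List Int :=
  if k ≤ kmax then k :: rungsLoopA kmax (k * 2) (by omega) else []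
termination_by (kmax + 1 - k).toNat
decreasing_by omega

-- _as_int(n) on an int argument is the identity; n // 2 is Python floor division
def rungs_for_n (n : Int) (kmax_cap : Int) : List Int :=
  let n_i := n
  if n_i < 2 then []
  else rungsLoopA (min kmax_cap (PySem.Int.floordiv n_i 2)) 2 (by omega)

-- ===== PORT B =====
-- Python int.bit_length() on a nonnegative value
def bitLen : Nat → Nat
  | 0 => 0
  | m + 1 => bitLen ((m + 1) / 2) + 1

def rungs_for_n_alt (n : Int) (kmax_cap : Int) : List Int :=
  let n_i := n
  if n_i < 2 then []
  else
    let kmax := min kmax_cap (PySem.Int.floordiv n_i 2)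
    (PySem.List.pyRange 1 (bitLen (max kmax 0).toNat : Nat) 1).map (fun i => (2 : Int) ^ i.toNat)

-- ===== PRECONDITION & SPEC =====
def Spec_rungs_for_n (n : Int) (kmax_cap : Int) (out : List Int) : Prop := out = rungs_for_n_alt n kmax_cap
instance (n : Int) (kmax_cap : Int) (out : List Int) : Decidable (Spec_rungs_for_n n kmax_cap out) := by unfold Spec_rungs_for_n; infer_instance

-- ===== CLAIM (what is proved, stated in full; the proofs are below) =====
def Claim_equal_rungs_for_n : Prop := ∀ (n : Int) (kmax_cap : Int), Dom_rungs_for_n n kmax_cap → Spec_rungs_for_n n kmax_cap (rungs_for_n n kmax_cap)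

-- ===== LEMMAS AND PROOFS =====

lemma bitLen_pos_eq (m : Nat) (h : 0 < m) : bitLen m = bitLen (m / 2) + 1 := by
  cases m with
  | zero => omega
  | succ k => rw [bitLen]

lemma pow_le_iff_lt_bitLen (j : Nat) : ∀ (m : Nat), 2 ^ j ≤ m ↔ j < bitLen m := by
  induction j with
  | zero =>
    intro m
    cases m with
    | zero => simp [bitLen]
    | succ k =>
      simp only [pow_zero]
      constructor
      · intro _; rw [bitLen_pos_eq (k+1) (by omega)]; omega
      · intro _; omega
  | succ j ih =>
    intro m
    rcases Nat.eq_zero_or_pos m with hm | hm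
    · subst hm; simp [bitLen]
    · rw [bitLen_pos_eq m hm]
      have h1 : 2 ^ (j + 1) ≤ m ↔ 2 ^ j ≤ m / 2 := by
        rw [Nat.le_div_iff_mul_le (by omega), pow_succ]
      rw [h1, ih (m / 2)]
      omega

-- the loop, started at 2^j (j ≥ 1), produces the powers 2^j, …, 2^(bitLen kmax - 1)
lemma rungsLoopA_congr (kmax k k' : Int) (h : 2 ≤ k) (h' : 2 ≤ k') (hkk : k = k') :
    rungsLoopA kmax k h = rungsLoopA kmax k' h' := by subst hkk; rfl

lemma rungsLoopA_eq (d : Nat) : ∀ (kmax : Int) (j : Nat) (hj : 1 ≤ j)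
    (hd : bitLen (max kmax 0).toNat - j = d) (hk2 : 2 ≤ (2 : Int) ^ j),
    rungsLoopA kmax ((2 : Int) ^ j) hk2 =
      (List.range' j d).map (fun i => (2 : Int) ^ i) := by
  induction d with
  | zero =>
    intro kmax j hj hd hk2
    rw [rungsLoopA]
    have hc : ((2 ^ j : Nat) : Int) = (2 : Int) ^ j := by push_cast; ring
    have hpos : 0 < (2 : Nat) ^ j := by positivity
    have hP : ¬ ((2 : Int) ^ j ≤ kmax) := by
      intro hle
      have h2 : (2 : Nat) ^ j ≤ (max kmax 0).toNat := by omega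
      have := (pow_le_iff_lt_bitLen j ((max kmax 0).toNat)).mp h2
      omega
    simp [hP]
  | succ d ih =>
    intro kmax j hj hd hk2
    rw [rungsLoopA]
    have hc : ((2 ^ j : Nat) : Int) = (2 : Int) ^ j := by push_cast; ring
    have hP : (2 : Int) ^ j ≤ kmax := by
      have h2 : (2 : Nat) ^ j ≤ (max kmax 0).toNat :=
        (pow_le_iff_lt_bitLen j ((max kmax 0).toNat)).mpr (by omega)
      omega
    have harg : (2 : Int) ^ j * 2 = (2 : Int) ^ (j + 1) := by rw [pow_succ]
    simp only [hP, if_true]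
    rw [List.range'_succ, List.map_cons]
    congr 1
    rw [rungsLoopA_congr kmax ((2:Int)^j * 2) ((2:Int)^(j+1)) (by omega) (by omega) harg]
    exact ih kmax (j + 1) (by omega) (by omega) _

-- ===== VERDICT (by name: the statement is the Claim_ definition above) =====
theorem rungs_for_n_spec : Claim_equal_rungs_for_n := by
  intro n kmax_cap _
  unfold Spec_rungs_for_n rungs_for_n rungs_for_n_alt
  by_cases hn : n < 2
  · simp [hn]
  · simp only [hn, if_false]
    set kmax := min kmax_cap (PySem.Int.floordiv n 2) with hk
    set B := bitLen (max kmax 0).toNat with hB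
    rw [rungsLoopA_congr kmax 2 ((2:Int)^(1:Nat)) (by omega) (by norm_num) (by norm_num)]
    rw [rungsLoopA_eq (B - 1) kmax 1 le_rfl rfl]
    rw [PySem.List.pyRange_one]
    rw [List.range'_eq_map_range]
    rw [List.map_map, List.map_map]
    have hlen : ((B : Int) - 1).toNat = B - 1 := by omega
    rw [hlen]
    apply List.map_congr_left
    intro k hk'
    simp only [Function.comp]
    congr 1
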